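-- pv_equiv track=rewrite | github.com/OKzsy/work | auto_process/build_cldmskFromMODIS.py | s2e
-- ===== SOURCE A (Python) =====
-- def s2e(s):
--     """
--
--     :param s: 原始cldMSK十进制的值
--     :return: 经解析后判断是否为云的cld_code
--              1:该像元由于种种原因不能判断
--              2:晴朗像元
--              3:云像元
--     """
--     cld_code = -10
--     if s == 0:
--         cld_code = 0
--         return cld_code
--     if s < 0:
--         s = s * -1 - 1
--         e = [0, 0, 0, 0, 0, 0, 0, 0]
--         for i in range(0, 8, 1):
--             e[i] = int(s % 2)
--             s = s // 2
--         bin_value = [str(1 - x) for x in list(reversed(e))]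
--     else:
--         e = [0, 0, 0, 0, 0, 0, 0, 0]
--         for i in range(0, 8, 1):
--             e[i] = int(s % 2)
--             s = s // 2
--         bin_value = [str(x) for x in list(reversed(e))]
--     determined = bin_value[-1:][0]
--     binary_value = ''.join(bin_value)
--     bit_value = binary_value[-3:-1]
--     if determined == 0:
--         cld_code = 1
--     elif bit_value == '00':
--         cld_code = 3
--     elif bit_value == '01':
--         cld_code = 2
--     elif bit_value == '10':
--         cld_code = 2
--     else:
--         cld_code = 2
--     return cld_code
-- ===== SOURCE B (Python) =====
-- def s2e(s):
--     # Closed form: only bits 1-2 of the (possibly complemented) 8-bit value matter,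
--     # and only the '00' pattern yields 3; everything else nonzero yields 2.
--     if s == 0:
--         return 0
--     v = s if s > 0 else -s - 1
--     k = (v // 2) % 4
--     return 3 if (k == 0 if s > 0 else k == 3) else 2
-- ===== Notes on version B (the rewrite author's own statement) =====
-- stated objective: simpler
-- what changed: Replaces the bit-list extraction loop, list reversal, string join and negative-index slicing by a closed arithmetic form that reads only the two relevant bits of the value (complemented first when the input is negative) with floor division and modulo.
import Mathlib
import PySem

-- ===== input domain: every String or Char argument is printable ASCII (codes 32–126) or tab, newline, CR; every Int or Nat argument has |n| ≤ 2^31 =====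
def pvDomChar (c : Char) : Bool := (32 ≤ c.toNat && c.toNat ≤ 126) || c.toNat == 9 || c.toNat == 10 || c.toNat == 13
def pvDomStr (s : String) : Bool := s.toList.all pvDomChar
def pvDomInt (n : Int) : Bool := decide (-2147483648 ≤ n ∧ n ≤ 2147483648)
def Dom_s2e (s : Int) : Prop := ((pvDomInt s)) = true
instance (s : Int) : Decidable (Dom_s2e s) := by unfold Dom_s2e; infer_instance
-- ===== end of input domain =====

-- B replaces A's 8-bit list/reverse/join/slice string decoding by a closed arithmetic form on the two relevant bits (objective: simpler).

-- ===== PORT A =====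
def s2e (s : Int) : Int :=
  if s = 0 then 0
  else
    -- both Python branches run the same 8-iteration bit-extraction loop over e = [0]*8
    let s1 : Int := if s < 0 then s * -1 - 1 else s
    let st := (PySem.List.pyRange 0 8 1).foldl
      (fun (st : List Int × Int) i =>
        (PySem.List.pySetD st.1 i (PySem.Int.mod st.2 2), PySem.Int.floordiv st.2 2))
      (([0, 0, 0, 0, 0, 0, 0, 0] : List Int), s1)
    let e := st.1
    let bin_value : List String :=
      if s < 0 then (e.reverse).map (fun x => PySem.Int.toStr (1 - x))
      else (e.reverse).map (fun x => PySem.Int.toStr x)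
    let _determined := PySem.List.pyGetD (PySem.List.slice bin_value (some (-1)) none) 0 ""
    let binary_value := PySem.Str.join "" bin_value
    let bit_value := PySem.Str.slice binary_value (some (-3)) (some (-1))
    -- Python's `determined == 0` compares a str with the int 0: always False (ported as the dropped first branch)
    if bit_value == "00" then 3
    else if bit_value == "01" then 2
    else if bit_value == "10" then 2
    else 2

-- ===== PORT B =====
def s2e_alt (s : Int) : Int :=
  if s = 0 then 0
  else
    let v : Int := if s > 0 then s else -s - 1
    let k := PySem.Int.mod (PySem.Int.floordiv v 2) 4
    if (if s > 0 then k == 0 else k == 3) then 3 else 2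

-- ===== PRECONDITION & SPEC =====
def Spec_s2e (s : Int) (out : Int) : Prop := out = s2e_alt s
instance (s : Int) (out : Int) : Decidable (Spec_s2e s out) := by unfold Spec_s2e; infer_instance

-- ===== CLAIM (what is proved, stated in full; the proofs are below) =====
def Claim_equal_s2e : Prop := ∀ (s : Int), Dom_s2e s → Spec_s2e s (s2e s)

-- ===== LEMMAS AND PROOFS =====

-- A's bit-extraction loop, unrolled: e ends as the 8 low bits of s1 (m i below), s1 halved 8 times.
lemma s2e_fold (v : Int) :
    ((PySem.List.pyRange 0 8 1).foldl
      (fun (st : List Int × Int) i =>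
        (PySem.List.pySetD st.1 i (PySem.Int.mod st.2 2), PySem.Int.floordiv st.2 2))
      (([0, 0, 0, 0, 0, 0, 0, 0] : List Int), v)).1
   = [PySem.Int.mod v 2,
      PySem.Int.mod (PySem.Int.floordiv v 2) 2,
      PySem.Int.mod (PySem.Int.floordiv (PySem.Int.floordiv v 2) 2) 2,
      PySem.Int.mod (PySem.Int.floordiv (PySem.Int.floordiv (PySem.Int.floordiv v 2) 2) 2) 2,
      PySem.Int.mod (PySem.Int.floordiv (PySem.Int.floordiv (PySem.Int.floordiv (PySem.Int.floordiv v 2) 2) 2) 2) 2,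
      PySem.Int.mod (PySem.Int.floordiv (PySem.Int.floordiv (PySem.Int.floordiv (PySem.Int.floordiv (PySem.Int.floordiv v 2) 2) 2) 2) 2) 2,
      PySem.Int.mod (PySem.Int.floordiv (PySem.Int.floordiv (PySem.Int.floordiv (PySem.Int.floordiv (PySem.Int.floordiv (PySem.Int.floordiv v 2) 2) 2) 2) 2) 2) 2,
      PySem.Int.mod (PySem.Int.floordiv (PySem.Int.floordiv (PySem.Int.floordiv (PySem.Int.floordiv (PySem.Int.floordiv (PySem.Int.floordiv (PySem.Int.floordiv v 2) 2) 2) 2) 2) 2) 2) 2] := by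
  have hr : PySem.List.pyRange 0 8 1 = [0,1,2,3,4,5,6,7] := by decide
  rw [hr]
  norm_num [List.foldl, PySem.List.pySetD_of_nonneg, List.set]
  rfl

lemma slice8 (c0 c1 c2 c3 c4 c5 c6 c7 : Char) :
  PySem.List.slice [c0,c1,c2,c3,c4,c5,c6,c7] (some (-3)) (some (-1)) = [c5, c6] := rfl

lemma toList_bit (b : Int) (h : b = 0 ∨ b = 1) :
    (PySem.Int.toStr b).toList = [if b = 0 then '0' else '1'] := by
  rcases h with rfl | rfl <;> decide

lemma join8 (s0 s1 s2 s3 s4 s5 s6 s7 : String) :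
    (PySem.Str.join "" [s0,s1,s2,s3,s4,s5,s6,s7]).toList
      = s0.toList ++ s1.toList ++ s2.toList ++ s3.toList ++ s4.toList ++ s5.toList ++ s6.toList ++ s7.toList := by
  simp [PySem.Str.join, PySem.Chars.join, List.intercalate]

-- the if-chain of A, given the two characters of bit_value: only the '00' case gives 3
lemma core (a5 a6 : Int) (bv : String)
    (hbv : bv.toList = [if a5 = 0 then '0' else '1', if a6 = 0 then '0' else '1']) :
    (if bv == "00" then (3:Int)
     else if bv == "01" then 2
     else if bv == "10" then 2
     else 2)
    = if a5 = 0 ∧ a6 = 0 then 3 else 2 := by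
  have key : ∀ t : String, (bv = t) ↔ t.toList = [if a5 = 0 then '0' else '1', if a6 = 0 then '0' else '1'] := by
    intro t
    constructor
    · intro h; rw [← h, hbv]
    · intro h; apply String.toList_inj.mp; rw [hbv, h]
  simp only [beq_iff_eq, key]
  by_cases g5 : a5 = 0 <;> by_cases g6 : a6 = 0 <;> simp [g5, g6]

-- bit_value's characters, computed from the 8 one-bit strings
lemma sliceJoin (a0 a1 a2 a3 a4 a5 a6 a7 : Int)
    (g0 : a0 = 0 ∨ a0 = 1) (g1 : a1 = 0 ∨ a1 = 1) (g2 : a2 = 0 ∨ a2 = 1)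
    (g3 : a3 = 0 ∨ a3 = 1) (g4 : a4 = 0 ∨ a4 = 1) (g5 : a5 = 0 ∨ a5 = 1)
    (g6 : a6 = 0 ∨ a6 = 1) (g7 : a7 = 0 ∨ a7 = 1) :
    (PySem.Str.slice
        (PySem.Str.join "" [PySem.Int.toStr a0, PySem.Int.toStr a1, PySem.Int.toStr a2, PySem.Int.toStr a3,
                            PySem.Int.toStr a4, PySem.Int.toStr a5, PySem.Int.toStr a6, PySem.Int.toStr a7])
        (some (-3)) (some (-1))).toList
      = [if a5 = 0 then '0' else '1', if a6 = 0 then '0' else '1'] := by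
  rw [PySem.Str.toList_slice, PySem.Chars.slice_eq_listSlice, join8,
      toList_bit _ g0, toList_bit _ g1, toList_bit _ g2, toList_bit _ g3,
      toList_bit _ g4, toList_bit _ g5, toList_bit _ g6, toList_bit _ g7]
  exact slice8 _ _ _ _ _ _ _ _

lemma bit01 (a : Int) : PySem.Int.mod a 2 = 0 ∨ PySem.Int.mod a 2 = 1 := by
  have h1 := PySem.Int.mod_nonneg a (b := 2) (by norm_num)
  have h2 := PySem.Int.mod_lt a (b := 2) (by norm_num)
  omega

-- ===== VERDICT (by name: the statement is the Claim_ definition above) =====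
theorem s2e_spec : Claim_equal_s2e := by
  intro s _
  unfold Spec_s2e s2e s2e_alt
  by_cases hs : s = 0
  · simp [hs]
  rw [if_neg hs, if_neg hs]
  by_cases hneg : s < 0
  · -- negative s: s1 = s * -1 - 1, bits complemented
    rw [if_pos hneg, if_neg (show ¬ s > 0 by omega)]
    rw [show s * -1 - 1 = -s - 1 by ring]
    simp only [s2e_fold, List.reverse_cons, List.reverse_nil, List.nil_append, List.cons_append,
               List.map_cons, List.map_nil]
    rw [if_pos hneg]
    rw [core _ _ _ (sliceJoin _ _ _ _ _ _ _ _
      (by have := bit01 (PySem.Int.floordiv (PySem.Int.floordiv (PySem.Int.floordiv (PySem.Int.floordiv (PySem.Int.floordiv (PySem.Int.floordiv (PySem.Int.floordiv (-s-1) 2) 2) 2) 2) 2) 2) 2); omega)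
      (by have := bit01 (PySem.Int.floordiv (PySem.Int.floordiv (PySem.Int.floordiv (PySem.Int.floordiv (PySem.Int.floordiv (PySem.Int.floordiv (-s-1) 2) 2) 2) 2) 2) 2); omega)
      (by have := bit01 (PySem.Int.floordiv (PySem.Int.floordiv (PySem.Int.floordiv (PySem.Int.floordiv (PySem.Int.floordiv (-s-1) 2) 2) 2) 2) 2); omega)
      (by have := bit01 (PySem.Int.floordiv (PySem.Int.floordiv (PySem.Int.floordiv (PySem.Int.floordiv (-s-1) 2) 2) 2) 2); omega)
      (by have := bit01 (PySem.Int.floordiv (PySem.Int.floordiv (PySem.Int.floordiv (-s-1) 2) 2) 2); omega)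
      (by have := bit01 (PySem.Int.floordiv (PySem.Int.floordiv (-s-1) 2) 2); omega)
      (by have := bit01 (PySem.Int.floordiv (-s-1) 2); omega)
      (by have := bit01 (-s-1); omega))]
    simp only [PySem.Int.floordiv_eq_ediv_of_pos (show (0:Int) < 2 by norm_num),
               PySem.Int.mod_eq_emod_of_pos (show (0:Int) < 2 by norm_num),
               PySem.Int.mod_eq_emod_of_pos (show (0:Int) < 4 by norm_num)]
    split_ifs <;> simp_all only [beq_iff_eq] <;> omega
  · -- positive s: s1 = s, bits as-is
    rw [if_neg hneg, if_pos (show s > 0 by omega)]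
    simp only [s2e_fold, List.reverse_cons, List.reverse_nil, List.nil_append, List.cons_append,
               List.map_cons, List.map_nil]
    rw [if_neg hneg]
    rw [core _ _ _ (sliceJoin _ _ _ _ _ _ _ _
      (bit01 _) (bit01 _) (bit01 _) (bit01 _) (bit01 _) (bit01 _) (bit01 _) (bit01 _))]
    simp only [PySem.Int.floordiv_eq_ediv_of_pos (show (0:Int) < 2 by norm_num),
               PySem.Int.mod_eq_emod_of_pos (show (0:Int) < 2 by norm_num),
               PySem.Int.mod_eq_emod_of_pos (show (0:Int) < 4 by norm_num)]
    split_ifs <;> simp_all only [beq_iff_eq] <;> omega
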